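-- pv_equiv track=rewrite | github.com/OpenNMT/nmt-wizard-docker | frameworks/opennmt_lua/entrypoint.py | _protect_characters
-- ===== SOURCE A (Python) =====
-- def _protect_characters(string, protected, protector='%'):
--     new_string = ""
--     for char in string:
--         if protected.find(char) != -1:
--             new_string += protector + char
--         else:
--             new_string += char
--     return new_string
-- ===== SOURCE B (Python) =====
-- def _protect_characters(string, protected, protector='%'):
--     table = {ord(c): protector + c for c in protected}
--     return string.translate(table)
-- ===== Notes on version B (the rewrite author's own statement) =====
-- stated objective: idiomatic
-- what changed: Replaces the explicit per-character loop with find() membership tests by a precomputed translation table (ord -> protector+char) applied in one str.translate call.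
import Mathlib
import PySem

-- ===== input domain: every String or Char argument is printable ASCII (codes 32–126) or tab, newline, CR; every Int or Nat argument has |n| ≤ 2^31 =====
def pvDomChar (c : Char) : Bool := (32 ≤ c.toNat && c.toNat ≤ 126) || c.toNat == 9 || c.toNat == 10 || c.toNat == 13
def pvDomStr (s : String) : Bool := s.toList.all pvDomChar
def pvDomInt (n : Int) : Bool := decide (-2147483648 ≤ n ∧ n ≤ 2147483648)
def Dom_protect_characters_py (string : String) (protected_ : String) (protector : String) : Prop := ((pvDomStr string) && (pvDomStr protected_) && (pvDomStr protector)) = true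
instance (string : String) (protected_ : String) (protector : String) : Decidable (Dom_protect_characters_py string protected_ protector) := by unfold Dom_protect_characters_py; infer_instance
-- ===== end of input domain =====

-- B replaces A's per-character loop with find() tests by a precomputed character->replacement table applied in one translate pass (idiomatic).


-- ===== PORT A =====
def protect_characters_py (string : String) (protected_ : String) (protector : String) : String :=
  String.ofList (string.toList.foldl (fun new_string char =>
    if PySem.Str.find protected_ (String.ofList [char]) ≠ -1 then
      new_string ++ (protector.toList ++ [char])
    else
      new_string ++ [char]) [])

-- ===== PORT B =====
def protect_characters_py_alt (string : String) (protected_ : String) (protector : String) : String :=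
  let table : PySem.Dict Char (List Char) :=
    protected_.toList.foldl (fun d c => d.insert c (protector.toList ++ [c])) PySem.Dict.empty
  String.ofList (string.toList.flatMap (fun c => table.getD c [c]))

-- ===== PRECONDITION & SPEC =====
def Spec_protect_characters_py (string : String) (protected_ : String) (protector : String) (out : String) : Prop := out = protect_characters_py_alt string protected_ protector
instance (string : String) (protected_ : String) (protector : String) (out : String) : Decidable (Spec_protect_characters_py string protected_ protector out) := by unfold Spec_protect_characters_py; infer_instance

-- ===== CLAIM (what is proved, stated in full; the proofs are below) =====
def Claim_equal_protect_characters_py : Prop := ∀ (string : String) (protected_ : String) (protector : String), Dom_protect_characters_py string protected_ protector → Spec_protect_characters_py string protected_ protector (protect_characters_py string protected_ protector)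

-- ===== LEMMAS AND PROOFS =====

theorem getD_foldl_insert_fn (l : List Char) (f : Char → List Char)
    (d : PySem.Dict Char (List Char)) (x : Char) (dflt : List Char) :
    (l.foldl (fun d c => d.insert c (f c)) d).getD x dflt
      = if x ∈ l then f x else d.getD x dflt := by
  induction l generalizing d with
  | nil => simp
  | cons a l ih =>
    simp only [List.foldl_cons, ih, PySem.Dict.getD_insert, List.mem_cons]
    by_cases hx : x ∈ l <;> by_cases ha : x = a <;> simp [hx, ha]

theorem singleton_infix_iff_mem (c : Char) (l : List Char) : [c] <:+: l ↔ c ∈ l := by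
  constructor
  · intro h; exact h.subset (by simp)
  · intro h
    obtain ⟨s, t, rfl⟩ := List.append_of_mem h
    exact ⟨s, t, by simp⟩

set_option maxHeartbeats 1000000 in
theorem protect_characters_py_spec : Claim_equal_protect_characters_py := by
  intro string protected_ protector _
  unfold Spec_protect_characters_py protect_characters_py protect_characters_py_alt
  have hbody : (fun (new_string : List Char) (char : Char) =>
      if PySem.Str.find protected_ (String.ofList [char]) ≠ -1 then
        new_string ++ (protector.toList ++ [char])
      else
        new_string ++ [char])
      = (fun new_string char => new_string ++
          (if PySem.Str.find protected_ (String.ofList [char]) ≠ -1 then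
            protector.toList ++ [char] else [char])) := by
    funext acc c; split_ifs <;> rfl
  rw [hbody, PySem.List.foldl_append_eq_flatMap, List.nil_append]
  congr 1
  apply List.flatMap_congr
  intro c _
  rw [getD_foldl_insert_fn, PySem.Dict.getD_empty]
  have hiff : (PySem.Str.find protected_ (String.ofList [c]) ≠ -1) ↔ c ∈ protected_.toList := by
    rw [PySem.Str.find_ne_neg_one_iff,
        show (String.ofList [c]).toList = [c] from String.toList_ofList]
    exact singleton_infix_iff_mem c protected_.toList
  simp only [hiff]
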